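-- pv_equiv track=rewrite | github.com/vjdias/stm32_cnc_controller | plot_swv_csv.py | summarize_axis
-- ===== SOURCE A (Python) =====
-- from typing import Dict, List, Tuple
--
-- def summarize_axis(ax_id: int, series: List[Tuple[int,int,int]], offset: int) -> str:
--     n = len(series)
--     if n == 0:
--         return f"axis {ax_id}: no data"
--     t = [t for (t,_,__) in series]
--     enc = [p for (_,p,__) in series]
--     steps = [s for (_,__,s) in series]
--     enc_adj = [max(abs(p) - offset, 0) for p in enc]
--     t_min, t_max = min(t), max(t)
--     s_min, s_max = min(steps), max(steps)
--     er_min, er_max = min(enc), max(enc)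
--     ea_min, ea_max = min(enc_adj), max(enc_adj)
--     # Detect duplicates/out-of-order times
--     nondec = all(t[i] >= t[i-1] for i in range(1, n))
--     dup_ts = sum(1 for i in range(1, n) if t[i] == t[i-1])
--     return (f"axis {ax_id}: N={n} t=[{t_min},{t_max}] nondec={nondec} dups={dup_ts} | "
--             f"steps=[{s_min},{s_max}] enc_raw=[{er_min},{er_max}] enc_adj(|enc|-{offset})=[{ea_min},{ea_max}]")
-- ===== SOURCE B (Python) =====
-- def summarize_axis(ax_id, series, offset):
--     if not series:
--         return f"axis {ax_id}: no data"
--     (t0, p0, s0) = series[0]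
--     ea0 = max(abs(p0) - offset, 0)
--     t_min = t_max = t0
--     s_min = s_max = s0
--     er_min = er_max = p0
--     ea_min = ea_max = ea0
--     nondec = True
--     dup_ts = 0
--     prev_t = t0
--     for (ti, pi, si) in series[1:]:
--         eai = max(abs(pi) - offset, 0)
--         t_min = min(t_min, ti)
--         t_max = max(t_max, ti)
--         s_min = min(s_min, si)
--         s_max = max(s_max, si)
--         er_min = min(er_min, pi)
--         er_max = max(er_max, pi)
--         ea_min = min(ea_min, eai)
--         ea_max = max(ea_max, eai)
--         nondec = nondec and (prev_t <= ti)
--         if ti == prev_t: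
--             dup_ts += 1
--         prev_t = ti
--     n = len(series)
--     return (f"axis {ax_id}: N={n} t=[{t_min},{t_max}] nondec={nondec} dups={dup_ts} | "
--             f"steps=[{s_min},{s_max}] enc_raw=[{er_min},{er_max}] enc_adj(|enc|-{offset})=[{ea_min},{ea_max}]")
-- ===== Notes on version B (the rewrite author's own statement) =====
-- stated objective: alternative
-- what changed: Replaced A's three list comprehensions plus eight separate min/max reductions and two index-based range scans with a single loop over the series that maintains running min/max aggregates, a nondecreasing flag, a duplicate-timestamp counter and the previous timestamp.
import Mathlib
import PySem

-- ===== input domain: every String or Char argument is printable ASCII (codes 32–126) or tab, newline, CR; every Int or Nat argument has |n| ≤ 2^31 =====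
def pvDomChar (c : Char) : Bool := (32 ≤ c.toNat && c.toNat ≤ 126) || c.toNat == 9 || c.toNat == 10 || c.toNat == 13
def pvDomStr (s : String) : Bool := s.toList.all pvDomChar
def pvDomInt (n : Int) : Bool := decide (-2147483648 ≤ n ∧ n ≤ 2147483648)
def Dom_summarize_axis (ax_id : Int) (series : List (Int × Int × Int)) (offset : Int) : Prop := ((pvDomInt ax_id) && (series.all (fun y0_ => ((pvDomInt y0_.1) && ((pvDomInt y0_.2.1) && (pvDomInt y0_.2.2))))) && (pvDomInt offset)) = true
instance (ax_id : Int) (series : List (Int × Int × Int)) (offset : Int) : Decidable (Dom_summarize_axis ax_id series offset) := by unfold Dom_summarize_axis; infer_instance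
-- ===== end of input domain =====

-- B replaces A's three list comprehensions and eight separate reductions by one running-aggregate
-- pass over the series (objective: alternative single-pass decomposition).


-- ===== PORT A =====
def summarize_axis (ax_id : Int) (series : List (Int × Int × Int)) (offset : Int) : String :=
  let n : Int := series.length
  if n = 0 then "axis " ++ PySem.Int.toStr ax_id ++ ": no data"
  else
    let t := series.map (fun x => x.1)
    let enc := series.map (fun x => x.2.1)
    let steps := series.map (fun x => x.2.2)
    let enc_adj := enc.map (fun p => max (|p| - offset) 0)
    -- min/max on a nonempty list never raise here, hence ".getD 0" is never the default branch
    let t_min := (PySem.List.min? t (fun y => y)).getD 0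
    let t_max := (PySem.List.max? t (fun y => y)).getD 0
    let s_min := (PySem.List.min? steps (fun y => y)).getD 0
    let s_max := (PySem.List.max? steps (fun y => y)).getD 0
    let er_min := (PySem.List.min? enc (fun y => y)).getD 0
    let er_max := (PySem.List.max? enc (fun y => y)).getD 0
    let ea_min := (PySem.List.min? enc_adj (fun y => y)).getD 0
    let ea_max := (PySem.List.max? enc_adj (fun y => y)).getD 0
    let nondec := (PySem.List.pyRange 1 n 1).all
      (fun i => decide (PySem.List.pyGetD t (i-1) 0 ≤ PySem.List.pyGetD t i 0))
    let dup_ts : Int := ((PySem.List.pyRange 1 n 1).filter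
      (fun i => PySem.List.pyGetD t i 0 == PySem.List.pyGetD t (i-1) 0)).length
    "axis " ++ PySem.Int.toStr ax_id ++ ": N=" ++ PySem.Int.toStr n ++
    " t=[" ++ PySem.Int.toStr t_min ++ "," ++ PySem.Int.toStr t_max ++
    "] nondec=" ++ (if nondec then "True" else "False") ++
    " dups=" ++ PySem.Int.toStr dup_ts ++ " | steps=[" ++
    PySem.Int.toStr s_min ++ "," ++ PySem.Int.toStr s_max ++ "] enc_raw=[" ++
    PySem.Int.toStr er_min ++ "," ++ PySem.Int.toStr er_max ++ "] enc_adj(|enc|-" ++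
    PySem.Int.toStr offset ++ ")=[" ++ PySem.Int.toStr ea_min ++ "," ++
    PySem.Int.toStr ea_max ++ "]"

-- ===== PORT B =====
structure BState where
  tmin : Int
  tmax : Int
  smin : Int
  smax : Int
  ermin : Int
  ermax : Int
  eamin : Int
  eamax : Int
  nondec : Bool
  dups : Int
  prevT : Int
deriving Repr, DecidableEq

def bStep (offset : Int) (st : BState) (x : Int × Int × Int) : BState :=
  let eai := max (|x.2.1| - offset) 0
  { tmin := min st.tmin x.1, tmax := max st.tmax x.1,
    smin := min st.smin x.2.2, smax := max st.smax x.2.2,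
    ermin := min st.ermin x.2.1, ermax := max st.ermax x.2.1,
    eamin := min st.eamin eai, eamax := max st.eamax eai,
    nondec := st.nondec && decide (st.prevT ≤ x.1),
    dups := if x.1 == st.prevT then st.dups + 1 else st.dups,
    prevT := x.1 }

def summarize_axis_alt (ax_id : Int) (series : List (Int × Int × Int)) (offset : Int) : String :=
  match series with
  | [] => "axis " ++ PySem.Int.toStr ax_id ++ ": no data"
  | (t0, p0, s0) :: rest =>
    let ea0 := max (|p0| - offset) 0
    let st0 : BState := ⟨t0, t0, s0, s0, p0, p0, ea0, ea0, true, 0, t0⟩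
    let st := rest.foldl (bStep offset) st0
    let n : Int := series.length
    "axis " ++ PySem.Int.toStr ax_id ++ ": N=" ++ PySem.Int.toStr n ++
    " t=[" ++ PySem.Int.toStr st.tmin ++ "," ++ PySem.Int.toStr st.tmax ++
    "] nondec=" ++ (if st.nondec then "True" else "False") ++
    " dups=" ++ PySem.Int.toStr st.dups ++ " | steps=[" ++
    PySem.Int.toStr st.smin ++ "," ++ PySem.Int.toStr st.smax ++ "] enc_raw=[" ++
    PySem.Int.toStr st.ermin ++ "," ++ PySem.Int.toStr st.ermax ++ "] enc_adj(|enc|-" ++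
    PySem.Int.toStr offset ++ ")=[" ++ PySem.Int.toStr st.eamin ++ "," ++
    PySem.Int.toStr st.eamax ++ "]"

-- ===== PRECONDITION & SPEC =====
def Spec_summarize_axis (ax_id : Int) (series : List (Int × Int × Int)) (offset : Int) (out : String) : Prop := out = summarize_axis_alt ax_id series offset
instance (ax_id : Int) (series : List (Int × Int × Int)) (offset : Int) (out : String) : Decidable (Spec_summarize_axis ax_id series offset out) := by unfold Spec_summarize_axis; infer_instance

-- ===== CLAIM (what is proved, stated in full; the proofs are below) =====
def Claim_equal_summarize_axis : Prop := ∀ (ax_id : Int) (series : List (Int × Int × Int)) (offset : Int), Dom_summarize_axis ax_id series offset → Spec_summarize_axis ax_id series offset (summarize_axis ax_id series offset)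

-- ===== LEMMAS AND PROOFS =====

-- adjacency checks in list form
def chkFrom (p : Int) : List Int → Bool
  | [] => true
  | x :: xs => (decide (p ≤ x)) && chkFrom x xs

def dcntFrom (p : Int) : List Int → Int
  | [] => 0
  | x :: xs => (if x == p then 1 else 0) + dcntFrom x xs

theorem foldB_eq (offset : Int) (rest : List (Int × Int × Int)) (st : BState) :
    rest.foldl (bStep offset) st =
      { tmin := (rest.map (fun x => x.1)).foldl min st.tmin,
        tmax := (rest.map (fun x => x.1)).foldl max st.tmax,
        smin := (rest.map (fun x => x.2.2)).foldl min st.smin,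
        smax := (rest.map (fun x => x.2.2)).foldl max st.smax,
        ermin := (rest.map (fun x => x.2.1)).foldl min st.ermin,
        ermax := (rest.map (fun x => x.2.1)).foldl max st.ermax,
        eamin := ((rest.map (fun x => x.2.1)).map (fun p => max (|p| - offset) 0)).foldl min st.eamin,
        eamax := ((rest.map (fun x => x.2.1)).map (fun p => max (|p| - offset) 0)).foldl max st.eamax,
        nondec := st.nondec && chkFrom st.prevT (rest.map (fun x => x.1)),
        dups := st.dups + dcntFrom st.prevT (rest.map (fun x => x.1)),
        prevT := (rest.map (fun x => x.1)).foldl (fun _ x => x) st.prevT } := by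
  induction rest generalizing st with
  | nil => simp [chkFrom, dcntFrom]
  | cons x xs ih =>
    simp only [List.foldl_cons, List.map_cons, ih, bStep, chkFrom, dcntFrom]
    simp only [BState.mk.injEq, Bool.and_assoc, true_and, and_true]
    split_ifs <;> omega

theorem pyGetD_cons_shift (a : Int) (l : List Int) (k : Int) (hk : 0 ≤ k) :
    PySem.List.pyGetD (a :: l) (k + 1) 0 = PySem.List.pyGetD l k 0 := by
  rw [PySem.List.pyGetD_of_nonneg _ _ (by omega), PySem.List.pyGetD_of_nonneg _ _ hk]
  have : (k + 1).toNat = k.toNat + 1 := by omega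
  rw [this]; rfl

theorem range_key (p b : Int) (r : List Int) :
    PySem.List.pyRange 1 ((p :: b :: r).length : Int) 1 =
      1 :: (PySem.List.pyRange 1 ((b :: r).length : Int) 1).map (· + 1) := by
  rw [PySem.List.pyRange_one, PySem.List.pyRange_one]
  have h1 : (((p :: b :: r).length : Int) - 1).toNat = (b :: r).length := by simp
  have h2 : (((b :: r).length : Int) - 1).toNat = r.length := by simp
  rw [h1, h2, show (b :: r).length = r.length + 1 from rfl, List.range_succ_eq_map]
  simp only [List.map_cons, List.map_map]
  congr 1

theorem shift_step (p b : Int) (r : List Int) (i : Int) (hi : 1 ≤ i) :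
    (decide (PySem.List.pyGetD (p :: b :: r) (i + 1 - 1) 0 ≤ PySem.List.pyGetD (p :: b :: r) (i + 1) 0)) =
    (decide (PySem.List.pyGetD (b :: r) (i - 1) 0 ≤ PySem.List.pyGetD (b :: r) i 0)) := by
  have e1 : i + 1 - 1 = (i - 1) + 1 := by ring
  rw [e1, pyGetD_cons_shift p (b :: r) i (by omega),
      pyGetD_cons_shift p (b :: r) (i-1) (by omega)]

theorem nondec_eq (p : Int) (l : List Int) :
    (PySem.List.pyRange 1 ((p :: l).length : Int) 1).all
      (fun i => decide (PySem.List.pyGetD (p :: l) (i-1) 0 ≤ PySem.List.pyGetD (p :: l) i 0)) =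
    chkFrom p l := by
  induction l generalizing p with
  | nil => simp [chkFrom]
  | cons b r ih =>
    rw [range_key, List.all_cons, List.all_map]
    have h0 : (decide (PySem.List.pyGetD (p :: b :: r) ((1:Int)-1) 0 ≤ PySem.List.pyGetD (p :: b :: r) 1 0)) = decide (p ≤ b) := by
      norm_num [PySem.List.pyGetD_of_nonneg]
    have hcong : ((PySem.List.pyRange 1 ((b :: r).length : Int) 1).all
        ((fun i => decide (PySem.List.pyGetD (p :: b :: r) (i-1) 0 ≤ PySem.List.pyGetD (p :: b :: r) i 0)) ∘ (· + 1))) =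
        ((PySem.List.pyRange 1 ((b :: r).length : Int) 1).all
        (fun i => decide (PySem.List.pyGetD (b :: r) (i-1) 0 ≤ PySem.List.pyGetD (b :: r) i 0))) := by
      apply Bool.eq_iff_iff.mpr
      simp only [List.all_eq_true, Function.comp]
      refine forall_congr' (fun i => forall_congr' (fun hi => ?_))
      have h1 : (1:Int) ≤ i := (PySem.List.mem_pyRange_one.mp hi).1
      rw [shift_step p b r i h1]
    rw [h0, hcong, ih]
    rfl

theorem shift_step_d (p b : Int) (r : List Int) (i : Int) (hi : 1 ≤ i) :
    ((PySem.List.pyGetD (p :: b :: r) (i + 1) 0 == PySem.List.pyGetD (p :: b :: r) (i + 1 - 1) 0)) =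
    ((PySem.List.pyGetD (b :: r) i 0 == PySem.List.pyGetD (b :: r) (i - 1) 0)) := by
  have e1 : i + 1 - 1 = (i - 1) + 1 := by ring
  rw [e1, pyGetD_cons_shift p (b :: r) i (by omega),
      pyGetD_cons_shift p (b :: r) (i-1) (by omega)]

theorem dups_eq (p : Int) (l : List Int) :
    (((PySem.List.pyRange 1 ((p :: l).length : Int) 1).filter
      (fun i => PySem.List.pyGetD (p :: l) i 0 == PySem.List.pyGetD (p :: l) (i-1) 0)).length : Int) =
    dcntFrom p l := by
  induction l generalizing p with
  | nil => simp [dcntFrom]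
  | cons b r ih =>
    rw [range_key, List.filter_cons]
    have h0 : ((PySem.List.pyGetD (p :: b :: r) (1:Int) 0 == PySem.List.pyGetD (p :: b :: r) ((1:Int)-1) 0)) = (b == p) := by
      norm_num [PySem.List.pyGetD_of_nonneg]
    have hfilt : (((PySem.List.pyRange 1 ((b :: r).length : Int) 1).map (· + 1)).filter
        (fun i => PySem.List.pyGetD (p :: b :: r) i 0 == PySem.List.pyGetD (p :: b :: r) (i-1) 0)).length =
        ((PySem.List.pyRange 1 ((b :: r).length : Int) 1).filter
        (fun i => PySem.List.pyGetD (b :: r) i 0 == PySem.List.pyGetD (b :: r) (i-1) 0)).length := by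
      rw [List.filter_map, List.length_map, ← List.countP_eq_length_filter, ← List.countP_eq_length_filter]
      apply List.countP_congr
      intro i hi
      have h1 : (1:Int) ≤ i := (PySem.List.mem_pyRange_one.mp hi).1
      simpa [Function.comp] using shift_step_d p b r i h1
    rw [h0]
    have ihb := ih b
    by_cases hb : b = p
    · rw [if_pos (by simp [hb]), List.length_cons, hfilt]
      push_cast
      rw [ihb]
      simp [dcntFrom, hb]
      omega
    · rw [if_neg (by simp [hb]), hfilt]
      rw [ihb]
      simp [dcntFrom, hb]

-- ===== VERDICT (by name: the statement is the Claim_ definition above) =====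
theorem summarize_axis_spec : Claim_equal_summarize_axis := by
  intro ax_id series offset _
  unfold Spec_summarize_axis
  cases series with
  | nil => rfl
  | cons x rest =>
    obtain ⟨t0, p0, s0⟩ := x
    have hn := nondec_eq t0 (rest.map (fun x => x.1))
    have hd := dups_eq t0 (rest.map (fun x => x.1))
    simp only [List.length_cons, List.length_map] at hn hd
    have hne : ¬ (((rest.length + 1 : Nat) : Int) = 0) := by push_cast; omega
    simp only [summarize_axis, summarize_axis_alt, List.map_cons, List.length_cons,
      PySem.List.min?_id_cons, PySem.List.max?_id_cons, Option.getD_some, foldB_eq, hd]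
    rw [if_neg hne]
    have hiff : (∀ x : Int, 1 ≤ x → x ≤ (rest.length : Int) →
        PySem.List.pyGetD (t0 :: rest.map (fun x => x.1)) (x-1) 0 ≤
        PySem.List.pyGetD (t0 :: rest.map (fun x => x.1)) x 0) ↔
        (chkFrom t0 (rest.map (fun x => x.1)) = true) := by
      rw [← hn]
      simp only [List.all_eq_true, PySem.List.mem_pyRange_one, decide_eq_true_eq, and_imp]
      constructor
      · intro h i h1 h2; exact h i h1 (by omega)
      · intro h i h1 h2; exact h i h1 (by push_cast at h2 ⊢; omega)
    simp [hiff]
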